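-- pv_equiv track=rewrite | github.com/Helias/PNG-reindexing | main.py | matrix_co_occurences
-- ===== SOURCE A (Python) =====
-- def matrix_co_occurences(matrix, palette):
--     occ = {}
--
--     for i in range(len(palette)):
--         for j in range(len(palette)):
--             occ[str(i)+"_"+str(j)]=0
--
--     for i in range(len(matrix)):
--         for j in range(len(matrix[i])-1):
--             occ[str(matrix[i][j])+"_"+str(matrix[i][j+1])]+=1
--
--     return occ
-- ===== SOURCE B (Python) =====
-- def matrix_co_occurences(matrix, palette):
--     pairs = [p for row in matrix for p in zip(row, row[1:])]
--     return {str(i) + "_" + str(j): sum(1 for p in pairs if p == (i, j))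
--             for i in range(len(palette)) for j in range(len(palette))}
-- ===== Notes on version B (the rewrite author's own statement) =====
-- stated objective: alternative
-- what changed: B first flattens the matrix into one list of adjacent pairs via zip, then builds the result directly as a dict comprehension whose value for each palette-index pair (i,j) is a per-key count of that pair, instead of A's pre-seeded dict mutated by in-place += increments.
import Mathlib
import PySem

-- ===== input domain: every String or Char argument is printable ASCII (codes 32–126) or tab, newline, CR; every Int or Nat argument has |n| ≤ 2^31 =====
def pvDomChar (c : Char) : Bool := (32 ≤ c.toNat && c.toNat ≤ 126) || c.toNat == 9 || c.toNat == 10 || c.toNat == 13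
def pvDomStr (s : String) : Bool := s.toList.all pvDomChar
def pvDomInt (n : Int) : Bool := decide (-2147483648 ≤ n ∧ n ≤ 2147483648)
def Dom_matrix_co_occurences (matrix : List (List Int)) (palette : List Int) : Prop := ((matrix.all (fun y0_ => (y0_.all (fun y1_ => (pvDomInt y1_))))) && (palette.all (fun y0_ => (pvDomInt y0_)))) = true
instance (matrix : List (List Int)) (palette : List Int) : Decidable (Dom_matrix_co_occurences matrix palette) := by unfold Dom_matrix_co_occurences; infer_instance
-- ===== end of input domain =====

-- B builds the adjacent-pair list once with zip and produces the table by a per-key count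
-- (dict comprehension), instead of A's pre-seeded dict mutated by in-place increments.
-- str(i) + "_" + str(j), shared literally by both programs
def pvKey (a b : Int) : String := PySem.Int.toStr a ++ "_" ++ PySem.Int.toStr b

-- ===== PORT A =====
def matrix_co_occurences (matrix : List (List Int)) (palette : List Int) : List (String × Int) :=
  -- occ = {}; for i in range(len(palette)): for j in range(len(palette)): occ[str(i)+"_"+str(j)] = 0
  let occ0 : PySem.Dict String Int :=
    (PySem.List.pyRange 0 (palette.length : Int) 1).foldl (fun d i =>
      (PySem.List.pyRange 0 (palette.length : Int) 1).foldl (fun d j =>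
        d.insert (pvKey i j) 0) d) PySem.Dict.empty
  -- for i in range(len(matrix)): for j in range(len(matrix[i])-1): occ[key] += 1
  -- 'occ[key] += 1' raises KeyError when key is absent: the state is Option (Dict …), none = raised
  let occ? : Option (PySem.Dict String Int) :=
    (PySem.List.pyRange 0 (matrix.length : Int) 1).foldl (fun od i =>
      let row := PySem.List.pyGetD matrix i []
      (PySem.List.pyRange 0 ((row.length : Int) - 1) 1).foldl (fun od j =>
        od.bind (fun d =>
          let k := pvKey (PySem.List.pyGetD row j 0) (PySem.List.pyGetD row (j + 1) 0)
          match d.get? k with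
          | some v => some (d.insert k (v + 1))
          | none => none)) od) (some occ0)
  match occ? with
  | some d => d.items
  | none => []          -- unreachable under Pre_ (Python raised KeyError)

-- ===== PORT B =====
def matrix_co_occurences_alt (matrix : List (List Int)) (palette : List Int) : List (String × Int) :=
  -- pairs = [p for row in matrix for p in zip(row, row[1:])]
  let pairs : List (Int × Int) := matrix.flatMap (fun row => row.zip (PySem.List.slice row (some 1) none))
  -- {str(i)+"_"+str(j): sum(1 for p in pairs if p == (i, j)) for i in … for j in …}
  -- the comprehension's keys are pairwise distinct, so the dict's items are in generation order
  (PySem.List.pyRange 0 (palette.length : Int) 1).flatMap (fun i =>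
    (PySem.List.pyRange 0 (palette.length : Int) 1).map (fun j =>
      (pvKey i j, ((pairs.map (fun p => if p = (i, j) then (1 : Int) else 0)).sum))))

-- ===== PRECONDITION & SPEC =====
-- Pre_ excludes exactly the inputs on which A raises KeyError: a row with at least two
-- entries containing a value outside range(len(palette)).
def Pre_matrix_co_occurences (matrix : List (List Int)) (palette : List Int) : Prop :=
  ∀ row ∈ matrix, 2 ≤ row.length → ∀ x ∈ row, 0 ≤ x ∧ x < (palette.length : Int)
instance (matrix : List (List Int)) (palette : List Int) : Decidable (Pre_matrix_co_occurences matrix palette) := by unfold Pre_matrix_co_occurences; infer_instance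

def pvWitness_matrix_co_occurences : List (List Int) × List Int := ([[0, 1, 1], [1, 0]], [10, 20])

def Spec_matrix_co_occurences (matrix : List (List Int)) (palette : List Int) (out : List (String × Int)) : Prop := out = matrix_co_occurences_alt matrix palette
instance (matrix : List (List Int)) (palette : List Int) (out : List (String × Int)) : Decidable (Spec_matrix_co_occurences matrix palette out) := by unfold Spec_matrix_co_occurences; infer_instance

-- ===== CLAIM (what is proved, stated in full; the proofs are below) =====
def Claim_equal_matrix_co_occurences : Prop := ∀ (matrix : List (List Int)) (palette : List Int), Dom_matrix_co_occurences matrix palette → Pre_matrix_co_occurences matrix palette → Spec_matrix_co_occurences matrix palette (matrix_co_occurences matrix palette)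
-- ===== LEMMAS AND PROOFS =====

-- ---- decimal digits: value round-trip and the characters involved ----

def pvDigitsVal (cs : List Char) : Nat := cs.foldl (fun a c => a * 10 + (c.toNat - 48)) 0

theorem pvDigitsVal_append (xs ys : List Char) :
    pvDigitsVal (xs ++ ys) = ys.foldl (fun a c => a * 10 + (c.toNat - 48)) (pvDigitsVal xs) := by
  unfold pvDigitsVal; rw [List.foldl_append]

theorem pvDigitChar_val {k : Nat} (hk : k < 10) : (Nat.digitChar k).toNat - 48 = k := by
  interval_cases k <;> decide

theorem pvDigitsVal_toDigits : ∀ n : Nat, pvDigitsVal (Nat.toDigits 10 n) = n := by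
  intro n
  induction n using Nat.strong_induction_on with
  | _ n ih =>
    by_cases h : n < 10
    · rw [Nat.toDigits_of_lt_base h]
      unfold pvDigitsVal
      simp [pvDigitChar_val h]
    · rw [Nat.toDigits_of_base_le (by norm_num) (by omega)]
      rw [pvDigitsVal_append]
      have h10 : n / 10 < n := Nat.div_lt_self (by omega) (by norm_num)
      simp [List.foldl, ih _ h10, pvDigitChar_val (Nat.mod_lt n (by norm_num))]
      omega

theorem pvToDigits_no_underscore : ∀ n : Nat, '_' ∉ Nat.toDigits 10 n := by
  intro n
  induction n using Nat.strong_induction_on with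
  | _ n ih =>
    by_cases h : n < 10
    · rw [Nat.toDigits_of_lt_base h]
      interval_cases n <;> decide
    · rw [Nat.toDigits_of_base_le (by norm_num) (by omega)]
      intro hm
      rcases List.mem_append.1 hm with hm | hm
      · exact ih _ (Nat.div_lt_self (by omega) (by norm_num)) hm
      · have h10 := Nat.mod_lt n (show 0 < 10 by norm_num)
        rw [List.mem_singleton] at hm
        revert hm
        interval_cases (n % 10) <;> decide

theorem pvToChars_nonneg {a : Int} (ha : 0 ≤ a) :
    PySem.Int.toChars a = Nat.toDigits 10 a.toNat := by
  unfold PySem.Int.toChars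
  rw [if_neg (by omega)]

theorem pvToChars_no_underscore {a : Int} (ha : 0 ≤ a) : '_' ∉ PySem.Int.toChars a := by
  rw [pvToChars_nonneg ha]; exact pvToDigits_no_underscore _

theorem pvToChars_inj {a b : Int} (ha : 0 ≤ a) (hb : 0 ≤ b)
    (h : PySem.Int.toChars a = PySem.Int.toChars b) : a = b := by
  rw [pvToChars_nonneg ha, pvToChars_nonneg hb] at h
  have := pvDigitsVal_toDigits a.toNat
  rw [h, pvDigitsVal_toDigits b.toNat] at this
  omega

theorem pvAppend_cons_inj {α : Type} {c : α} :
    ∀ {xs xs' ys ys' : List α}, c ∉ xs → c ∉ xs' →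
      xs ++ c :: ys = xs' ++ c :: ys' → xs = xs' ∧ ys = ys' := by
  intro xs
  induction xs with
  | nil =>
    intro xs' ys ys' _ hx' h
    cases xs' with
    | nil => simpa using h
    | cons a t =>
      simp only [List.nil_append, List.cons_append, List.cons.injEq] at h
      exact absurd (h.1 ▸ List.mem_cons_self) hx'
  | cons a t ih =>
    intro xs' ys ys' hx hx' h
    cases xs' with
    | nil =>
      simp only [List.cons_append, List.nil_append, List.cons.injEq] at h
      exact absurd (h.1 ▸ List.mem_cons_self) hx
    | cons a' t' =>
      simp only [List.cons_append, List.cons.injEq] at h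
      obtain ⟨h1, h2⟩ := ih (fun hm => hx (List.mem_cons_of_mem _ hm))
        (fun hm => hx' (List.mem_cons_of_mem _ hm)) h.2
      exact ⟨by rw [h.1, h1], h2⟩

theorem pvKey_toList (a b : Int) :
    (pvKey a b).toList = PySem.Int.toChars a ++ '_' :: PySem.Int.toChars b := by
  unfold pvKey
  rw [String.toList_append, String.toList_append, PySem.Int.toList_toStr, PySem.Int.toList_toStr]
  rw [List.append_assoc]
  rfl

theorem pvKey_inj {a b i j : Int} (ha : 0 ≤ a) (hb : 0 ≤ b) (hi : 0 ≤ i) (hj : 0 ≤ j)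
    (h : pvKey a b = pvKey i j) : a = i ∧ b = j := by
  have h' := congrArg String.toList h
  rw [pvKey_toList, pvKey_toList] at h'
  obtain ⟨h1, h2⟩ := pvAppend_cons_inj (pvToChars_no_underscore ha) (pvToChars_no_underscore hi) h'
  exact ⟨pvToChars_inj ha hi h1, pvToChars_inj hb hj h2⟩

-- ---- shared abbreviations for the proof ----

def pvR (n : Nat) : List Int := PySem.List.pyRange 0 (n : Int) 1

def pvKeyList (n : Nat) : List (String × Int) :=
  (pvR n).flatMap (fun i => (pvR n).map (fun j => (pvKey i j, (0 : Int))))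

def pvPairs (matrix : List (List Int)) : List (Int × Int) :=
  matrix.flatMap (fun row => row.zip row.tail)

def pvInc (od : Option (PySem.Dict String Int)) (p : Int × Int) : Option (PySem.Dict String Int) :=
  od.bind (fun d =>
    match d.get? (pvKey p.1 p.2) with
    | some v => some (d.insert (pvKey p.1 p.2) (v + 1))
    | none => none)

theorem pvMem_R {n : Nat} {x : Int} : x ∈ pvR n ↔ 0 ≤ x ∧ x < (n : Int) := by
  unfold pvR
  exact PySem.List.mem_pyRange_one

-- ---- the seeding loop: items of the folded inserts are the key list ----

theorem pvKeys_items (d : PySem.Dict String Int) : d.keys = d.items.map Prod.fst := rfl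

theorem pvFoldl_insert_items :
    ∀ (L : List (String × Int)) (d : PySem.Dict String Int),
      (d.keys ++ L.map Prod.fst).Nodup →
      (L.foldl (fun d p => d.insert p.1 p.2) d).items = d.items ++ L ∧
      (L.foldl (fun d p => d.insert p.1 p.2) d).keys = d.keys ++ L.map Prod.fst := by
  intro L
  induction L with
  | nil => intro d _; simp
  | cons p L ih =>
    intro d hnd
    have hpk : p.1 ∉ d.keys := by
      rw [List.nodup_append] at hnd
      intro hm
      exact hnd.2.2 _ hm _ (by simp) rfl
    have hcon : d.contains p.1 = false := by
      rw [PySem.Dict.contains_eq_decide_mem_keys]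
      simpa using hpk
    have hitems : (d.insert p.1 p.2).items = d.items ++ [p] := by
      simpa using PySem.Dict.items_insert_of_not_contains d p.2 hcon
    have hkeys : (d.insert p.1 p.2).keys = d.keys ++ [p.1] := by
      rw [pvKeys_items, hitems, List.map_append, ← pvKeys_items]; rfl
    have hnd' : ((d.insert p.1 p.2).keys ++ L.map Prod.fst).Nodup := by
      rw [hkeys, List.append_assoc]
      simpa using hnd
    obtain ⟨h1, h2⟩ := ih (d.insert p.1 p.2) hnd'
    constructor
    · rw [List.foldl_cons, h1, hitems, List.append_assoc]; rfl
    · rw [List.foldl_cons, h2, hkeys, List.append_assoc]; rfl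

theorem pvKeyList_keys_nodup (n : Nat) : ((pvKeyList n).map Prod.fst).Nodup := by
  have hR : (pvR n).Nodup := by unfold pvR; exact PySem.List.nodup_pyRange_one 0 n
  have heq : (pvKeyList n).map Prod.fst = ((pvR n) ×ˢ (pvR n)).map (fun p => pvKey p.1 p.2) := by
    unfold pvKeyList
    simp [List.map_flatMap, SProd.sprod, List.product, Function.comp_def]
  rw [heq]
  refine List.Nodup.map_on ?_ (List.Nodup.product hR hR)
  rintro ⟨x1, x2⟩ hx ⟨y1, y2⟩ hy h
  rw [List.mem_product] at hx hy
  obtain ⟨hx1, hx2⟩ := hx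
  obtain ⟨hy1, hy2⟩ := hy
  rw [pvMem_R] at hx1 hx2 hy1 hy2
  obtain ⟨h1, h2⟩ := pvKey_inj hx1.1 hx2.1 hy1.1 hy2.1 h
  simp [h1, h2]

theorem pvSeed (n : Nat) :
    ((pvR n).foldl (fun d i =>
        (pvR n).foldl (fun (d : PySem.Dict String Int) j => d.insert (pvKey i j) 0) d)
        PySem.Dict.empty).items = pvKeyList n ∧
    ((pvR n).foldl (fun d i =>
        (pvR n).foldl (fun (d : PySem.Dict String Int) j => d.insert (pvKey i j) 0) d)
        PySem.Dict.empty).keys = (pvKeyList n).map Prod.fst := by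
  have hfold : (pvR n).foldl (fun d i =>
      (pvR n).foldl (fun (d : PySem.Dict String Int) j => d.insert (pvKey i j) 0) d)
      PySem.Dict.empty
      = (pvKeyList n).foldl (fun d p => d.insert p.1 p.2) PySem.Dict.empty := by
    unfold pvKeyList
    rw [List.foldl_flatMap]
    refine PySem.List.foldl_congr_mem _ _ _ _ (fun d i _ => ?_)
    rw [List.foldl_map]
  have hnd : ((PySem.Dict.empty : PySem.Dict String Int).keys ++ (pvKeyList n).map Prod.fst).Nodup := by
    rw [PySem.Dict.keys_empty, List.nil_append]
    exact pvKeyList_keys_nodup n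
  obtain ⟨h1, h2⟩ := pvFoldl_insert_items (pvKeyList n) PySem.Dict.empty hnd
  rw [hfold]
  exact ⟨by simpa using h1, by simpa using h2⟩

-- ---- the counting loop: an index loop over adjacent positions is a fold over zip ----

theorem pvZip_tail_eq_map_range (row : List Int) :
    row.zip row.tail = (List.range (row.length - 1)).map (fun k => (row.getD k 0, row.getD (k + 1) 0)) := by
  apply List.ext_getElem
  · simp [List.length_zip, List.length_tail]
  · intro k h1 h2
    have hk : k < row.length - 1 := by
      simpa [List.length_zip, List.length_tail] using h1
    simp only [List.getElem_zip, List.getElem_map, List.getElem_range, List.getElem_tail]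
    rw [List.getD_eq_getElem row 0 (by omega), List.getD_eq_getElem row 0 (by omega)]

theorem pvAdjacent_foldl {β : Type} (g : β → Int × Int → β) (row : List Int) (init : β) :
    (PySem.List.pyRange 0 ((row.length : Int) - 1) 1).foldl
      (fun acc j => g acc (PySem.List.pyGetD row j 0, PySem.List.pyGetD row (j + 1) 0)) init
      = (row.zip row.tail).foldl g init := by
  rw [PySem.List.pyRange_one]
  have hT : ((row.length : Int) - 1 - 0).toNat = row.length - 1 := by omega
  rw [hT, List.foldl_map, pvZip_tail_eq_map_range, List.foldl_map]
  refine PySem.List.foldl_congr_mem _ _ _ _ (fun acc k hk => ?_)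
  rw [List.mem_range] at hk
  have h1 : PySem.List.pyGetD row ((0 : Int) + (k : Int)) 0 = row.getD k 0 := by
    rw [zero_add, PySem.List.pyGetD_natCast]
  have h2 : PySem.List.pyGetD row ((0 : Int) + (k : Int) + 1) 0 = row.getD (k + 1) 0 := by
    rw [zero_add, show ((k : Int) + 1) = ((k + 1 : Nat) : Int) by push_cast; ring,
      PySem.List.pyGetD_natCast]
  rw [h1, h2]

-- ---- the increment fold: adds the per-key count of the pair list to every value ----

theorem pvInc_foldl :
    ∀ (ps : List (Int × Int)) (d : PySem.Dict String Int),
      d.keys.Nodup → (∀ p ∈ ps, pvKey p.1 p.2 ∈ d.keys) →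
      ps.foldl pvInc (some d) =
        some (PySem.Dict.mk (d.items.map (fun q =>
          (q.1, q.2 + (ps.countP (fun p => pvKey p.1 p.2 == q.1) : Int))))) := by
  intro ps
  induction ps with
  | nil =>
    intro d _ _
    simp only [List.foldl_nil, List.countP_nil, Nat.cast_zero, add_zero]
    congr 1
    cases d with
    | mk items => simp
  | cons p ps ih =>
    intro d hnd hmem
    have hk : pvKey p.1 p.2 ∈ d.keys := hmem p (by simp)
    have hcon : d.contains (pvKey p.1 p.2) = true := by
      rw [PySem.Dict.contains_eq_decide_mem_keys]; simpa using hk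
    obtain ⟨v, hv⟩ : ∃ v, d.get? (pvKey p.1 p.2) = some v := by
      have := PySem.Dict.contains_eq_isSome_get? d (pvKey p.1 p.2)
      rw [hcon] at this
      exact Option.isSome_iff_exists.1 this.symm
    have hstep : pvInc (some d) p = some (d.insert (pvKey p.1 p.2) (v + 1)) := by
      unfold pvInc
      simp [hv]
    have hitems' : (d.insert (pvKey p.1 p.2) (v + 1)).items = d.items.map (fun q =>
        if q.1 == pvKey p.1 p.2 then (pvKey p.1 p.2, v + 1) else q) :=
      PySem.Dict.items_insert_of_contains d (v + 1) hcon
    have hkeys' : (d.insert (pvKey p.1 p.2) (v + 1)).keys = d.keys := by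
      rw [pvKeys_items, hitems', List.map_map, pvKeys_items]
      refine List.map_congr_left (fun q _ => ?_)
      by_cases hq : q.1 = pvKey p.1 p.2 <;> simp [hq]
    have hmem' : ∀ r ∈ ps, pvKey r.1 r.2 ∈ (d.insert (pvKey p.1 p.2) (v + 1)).keys := by
      intro r hr
      rw [hkeys']
      exact hmem r (by simp [hr])
    have hih := ih (d.insert (pvKey p.1 p.2) (v + 1)) (by rw [hkeys']; exact hnd) hmem'
    rw [List.foldl_cons, hstep, hih]
    congr 1
    rw [hitems', List.map_map]
    refine congrArg _ (List.map_congr_left (fun q hq => ?_))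
    simp only [Function.comp_apply]
    by_cases hq1 : q.1 = pvKey p.1 p.2
    · have hqv : q.2 = v := by
        have h := PySem.Dict.get?_of_mem_items d (show (pvKey p.1 p.2, q.2) ∈ d.items from hq1 ▸ hq) hnd
        rw [hv] at h
        exact (Option.some.inj h).symm
      have hbt : (q.1 == pvKey p.1 p.2) = true := by simpa using hq1
      have hpp : (pvKey p.1 p.2 == q.1) = true := by simp [hq1]
      rw [if_pos hbt]
      simp only [List.countP_cons, hpp, if_pos]
      rw [hq1, hqv]
      simp only [Prod.mk.injEq, true_and]
      push_cast
      ring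
    · have hb : (q.1 == pvKey p.1 p.2) = false := by simpa using hq1
      rw [if_neg (by simp [hb])]
      have hbb : (pvKey p.1 p.2 == q.1) = false := by
        simp only [beq_eq_false_iff_ne, ne_eq]
        intro h; exact hq1 h.symm
      simp [hbb]

-- ---- bounds on the flattened pair list under Pre_ ----

theorem pvPairs_bounds {matrix : List (List Int)} {palette : List Int}
    (hpre : Pre_matrix_co_occurences matrix palette) :
    ∀ p ∈ pvPairs matrix, (0 ≤ p.1 ∧ p.1 < (palette.length : Int)) ∧
      (0 ≤ p.2 ∧ p.2 < (palette.length : Int)) := by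
  rintro ⟨a, b⟩ hp
  unfold pvPairs at hp
  rw [List.mem_flatMap] at hp
  obtain ⟨row, hrow, hab⟩ := hp
  obtain ⟨ha, hb⟩ := List.of_mem_zip hab
  have hlen : 2 ≤ row.length := by
    have htl : row.tail ≠ [] := List.ne_nil_of_mem hb
    have := List.length_pos_of_ne_nil htl
    rw [List.length_tail] at this
    omega
  have hb' : b ∈ row := List.mem_of_mem_tail hb
  exact ⟨hpre row hrow hlen a ha, hpre row hrow hlen b hb'⟩

theorem pvFlatMap_congr {α β : Type} (l : List α) (f g : α → List β)
    (h : ∀ a ∈ l, f a = g a) : l.flatMap f = l.flatMap g := by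
  induction l with
  | nil => rfl
  | cons a t ih =>
    rw [List.flatMap_cons, List.flatMap_cons, h a (by simp),
      ih (fun a ha => h a (by simp [ha]))]

theorem pvCount_sum (pairs : List (Int × Int)) (i j : Int) :
    (pairs.map (fun p => if p = (i, j) then (1 : Int) else 0)).sum =
      (pairs.countP (fun p => decide (p = (i, j))) : Int) := by
  rw [← PySem.List.sum_map_ite_one_zero (fun p => decide (p = (i, j)))]
  simp


theorem pvCountP_eq {matrix : List (List Int)} {palette : List Int}
    (hpre : Pre_matrix_co_occurences matrix palette) {i j : Int}
    (hi : i ∈ pvR palette.length) (hj : j ∈ pvR palette.length) :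
    (pvPairs matrix).countP (fun p => pvKey p.1 p.2 == pvKey i j) =
      (pvPairs matrix).countP (fun p => decide (p = (i, j))) := by
  refine List.countP_congr (fun p hp => ?_)
  obtain ⟨⟨hp1, _⟩, ⟨hp2, _⟩⟩ := pvPairs_bounds hpre p hp
  rw [pvMem_R] at hi hj
  simp only [beq_iff_eq, decide_eq_true_eq]
  constructor
  · intro h
    obtain ⟨h1, h2⟩ := pvKey_inj hp1 hp2 hi.1 hj.1 h
    exact Prod.ext h1 h2
  · intro h
    rw [h]

theorem pvKey_mem_keyList {matrix : List (List Int)} {palette : List Int}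
    (hpre : Pre_matrix_co_occurences matrix palette) :
    ∀ p ∈ pvPairs matrix, pvKey p.1 p.2 ∈ (pvKeyList palette.length).map Prod.fst := by
  intro p hp
  obtain ⟨⟨hp1, hp1'⟩, ⟨hp2, hp2'⟩⟩ := pvPairs_bounds hpre p hp
  rw [List.mem_map]
  refine ⟨(pvKey p.1 p.2, 0), ?_, rfl⟩
  unfold pvKeyList
  rw [List.mem_flatMap]
  exact ⟨p.1, pvMem_R.2 ⟨hp1, hp1'⟩, List.mem_map.2 ⟨p.2, pvMem_R.2 ⟨hp2, hp2'⟩, rfl⟩⟩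

-- ===== VERDICT (by name: the statement is the Claim_ definition above) =====
theorem matrix_co_occurences_spec : Claim_equal_matrix_co_occurences := by
  intro matrix palette _dom hpre
  unfold Spec_matrix_co_occurences
  obtain ⟨hs1, hs2⟩ := pvSeed palette.length
  have hnd : ((pvR palette.length).foldl (fun d i =>
      (pvR palette.length).foldl (fun (d : PySem.Dict String Int) j => d.insert (pvKey i j) 0) d)
      PySem.Dict.empty).keys.Nodup := by
    rw [hs2]; exact pvKeyList_keys_nodup palette.length
  have hmem : ∀ p ∈ pvPairs matrix, pvKey p.1 p.2 ∈ ((pvR palette.length).foldl (fun d i =>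
      (pvR palette.length).foldl (fun (d : PySem.Dict String Int) j => d.insert (pvKey i j) 0) d)
      PySem.Dict.empty).keys := by
    rw [hs2]; exact pvKey_mem_keyList hpre
  unfold pvR at hs1 hs2 hnd hmem
  -- B's result first
  have hB : matrix_co_occurences_alt matrix palette =
      (pvR palette.length).flatMap (fun i => (pvR palette.length).map (fun j =>
        (pvKey i j, ((pvPairs matrix).countP (fun p => decide (p = (i, j))) : Int)))) := by
    unfold matrix_co_occurences_alt
    simp only [PySem.List.slice_from_one]
    rw [show (matrix.flatMap fun row => row.zip row.tail) = pvPairs matrix from rfl]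
    refine pvFlatMap_congr _ _ _ (fun i _ => ?_)
    refine List.map_congr_left (fun j _ => ?_)
    rw [pvCount_sum]
  unfold matrix_co_occurences
  simp only []
  set occ0 := List.foldl (fun d i => List.foldl
      (fun (d : PySem.Dict String Int) j => d.insert (pvKey i j) 0) d
      (PySem.List.pyRange 0 (palette.length : Int) 1)) PySem.Dict.empty
      (PySem.List.pyRange 0 (palette.length : Int) 1) with hocc
  have hrow : ∀ (od : Option (PySem.Dict String Int)) (row : List Int),
      (PySem.List.pyRange 0 ((row.length : Int) - 1) 1).foldl (fun od j =>
        od.bind (fun d =>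
          match d.get? (pvKey (PySem.List.pyGetD row j 0) (PySem.List.pyGetD row (j + 1) 0)) with
          | some v => some (d.insert (pvKey (PySem.List.pyGetD row j 0)
              (PySem.List.pyGetD row (j + 1) 0)) (v + 1))
          | none => none)) od = (row.zip row.tail).foldl pvInc od := by
    intro od row
    rw [← pvAdjacent_foldl pvInc row od]
    exact PySem.List.foldl_congr_mem _ _ _ _ (fun acc x _ => rfl)
  have houter :
      List.foldl
        (fun (od : Option (PySem.Dict String Int)) i =>
          List.foldl
            (fun od j =>
              od.bind fun a =>
                match
                  a.get? (pvKey (PySem.List.pyGetD (PySem.List.pyGetD matrix i []) j 0)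
                      (PySem.List.pyGetD (PySem.List.pyGetD matrix i []) (j + 1) 0)) with
                | some v => some (a.insert (pvKey (PySem.List.pyGetD (PySem.List.pyGetD matrix i []) j 0)
                      (PySem.List.pyGetD (PySem.List.pyGetD matrix i []) (j + 1) 0)) (v + 1))
                | none => none)
            od (PySem.List.pyRange 0 (((PySem.List.pyGetD matrix i []).length : Int) - 1) 1))
        (some occ0) (PySem.List.pyRange 0 (matrix.length : Int) 1)
      = (pvPairs matrix).foldl pvInc (some occ0) := by
    calc
      _ = matrix.foldl (fun od row => (row.zip row.tail).foldl pvInc od) (some occ0) := by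
        rw [← PySem.List.foldl_pyRange_zero_pyGetD' matrix ([] : List Int)
          (fun od row => (row.zip row.tail).foldl pvInc od) (some occ0)]
        exact PySem.List.foldl_congr_mem _ _ _ _
          (fun acc x _ => hrow acc (PySem.List.pyGetD matrix x []))
      _ = (pvPairs matrix).foldl pvInc (some occ0) := by
        rw [pvPairs, List.foldl_flatMap]
  rw [houter, pvInc_foldl (pvPairs matrix) occ0 hnd hmem]
  show (PySem.Dict.mk (occ0.items.map (fun q =>
      (q.1, q.2 + ((pvPairs matrix).countP (fun p => pvKey p.1 p.2 == q.1) : Int))))).items = _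
  show occ0.items.map (fun q =>
      (q.1, q.2 + ((pvPairs matrix).countP (fun p => pvKey p.1 p.2 == q.1) : Int))) = _
  rw [hs1, hB]
  unfold pvKeyList
  rw [List.map_flatMap]
  refine pvFlatMap_congr _ _ _ (fun i hi => ?_)
  rw [List.map_map]
  refine List.map_congr_left (fun j hj => ?_)
  simp only [Function.comp_apply, zero_add]
  rw [pvCountP_eq hpre hi hj]
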